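-- pv_equiv track=rewrite | github.com/zo1nk3dd/CovidX-Analysis | data.py | location_from_idx
-- ===== SOURCE A (Python) =====
-- CLASS_LABELS = ['COVID', 'Normal', 'Viral Pneumonia']
--
-- CLASS_SIZES = [3616, 10192, 1345]
--
-- def location_from_idx(idx: int):
--     class_idx = 0
--     image_idx = idx
--     while class_idx < len(CLASS_LABELS):
--         if image_idx < CLASS_SIZES[class_idx]:
--             return class_idx, image_idx + 1
--         else:
--             image_idx -= CLASS_SIZES[class_idx]
--             class_idx += 1
--     return class_idx, image_idx + 1
-- ===== SOURCE B (Python) =====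
-- import bisect
--
-- CLASS_LABELS = ['COVID', 'Normal', 'Viral Pneumonia']
-- CLASS_SIZES = [3616, 10192, 1345]
-- _PREFIX = [3616, 13808, 15153]  # cumulative sums of CLASS_SIZES
--
-- def location_from_idx(idx: int):
--     class_idx = bisect.bisect_right(_PREFIX, idx)
--     base = _PREFIX[class_idx - 1] if class_idx > 0 else 0
--     return class_idx, idx - base + 1
-- ===== Notes on version B (the rewrite author's own statement) =====
-- stated objective: idiomatic
-- what changed: Replaces the subtract-and-advance while loop with a precomputed prefix-sum array and a bisect_right binary search to find the class, then one subtraction for the image index.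
import Mathlib
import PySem

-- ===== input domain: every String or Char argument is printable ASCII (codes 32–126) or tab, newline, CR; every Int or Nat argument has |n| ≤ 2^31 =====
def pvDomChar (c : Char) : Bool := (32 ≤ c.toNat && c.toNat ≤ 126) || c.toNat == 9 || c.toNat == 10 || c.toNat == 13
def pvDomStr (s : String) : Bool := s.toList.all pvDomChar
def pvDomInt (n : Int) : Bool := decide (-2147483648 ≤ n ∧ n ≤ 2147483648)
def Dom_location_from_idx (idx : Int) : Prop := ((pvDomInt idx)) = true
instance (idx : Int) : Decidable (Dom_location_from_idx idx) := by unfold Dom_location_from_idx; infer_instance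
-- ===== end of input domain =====

-- B replaces A's subtract-and-advance loop by a prefix-sum array and a bisect_right
-- binary search (idiomatic; same return value for every int).

-- ===== PORT A =====
-- A's while loop over class_idx, transliterated as recursion over CLASS_SIZES
-- carrying (class_idx, image_idx).
def lfiLoop : List Int → Int → Int → Int × Int
  | [], classIdx, imageIdx => (classIdx, imageIdx + 1)
  | s :: rest, classIdx, imageIdx =>
      if imageIdx < s then (classIdx, imageIdx + 1)
      else lfiLoop rest (classIdx + 1) (imageIdx - s)

def location_from_idx (idx : Int) : Int × Int :=
  lfiLoop [3616, 10192, 1345] 0 idx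

-- ===== PORT B =====
-- bisect.bisect_right(xs, x): the insertion point after existing entries ≤ x in the
-- sorted list xs; ported as the corresponding list function (stdlib-call port).
def lfiBisectRight (xs : List Int) (x : Int) : Nat :=
  (xs.takeWhile (fun a => a ≤ x)).length

def lfiPrefix : List Int := [3616, 13808, 15153]

def location_from_idx_alt (idx : Int) : Int × Int :=
  let classIdx := lfiBisectRight lfiPrefix idx
  let base := if classIdx > 0 then lfiPrefix.getD (classIdx - 1) 0 else 0
  ((classIdx : Int), idx - base + 1)

-- ===== PRECONDITION & SPEC =====
def Spec_location_from_idx (idx : Int) (out : Int × Int) : Prop := out = location_from_idx_alt idx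
instance (idx : Int) (out : Int × Int) : Decidable (Spec_location_from_idx idx out) := by unfold Spec_location_from_idx; infer_instance

-- ===== CLAIM (what is proved, stated in full; the proofs are below) =====
def Claim_equal_location_from_idx : Prop := ∀ (idx : Int), Dom_location_from_idx idx → Spec_location_from_idx idx (location_from_idx idx)

-- ===== LEMMAS AND PROOFS =====
theorem lfiBisectRight_eval (x : Int) :
    lfiBisectRight [3616, 13808, 15153] x =
      if x < 3616 then 0 else if x < 13808 then 1 else if x < 15153 then 2 else 3 := by
  simp only [lfiBisectRight, List.takeWhile_cons, List.takeWhile_nil, decide_eq_true_eq]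
  split_ifs <;> simp_all [List.length] <;> omega

-- ===== VERDICT (by name: the statement is the Claim_ definition above) =====
theorem location_from_idx_spec : Claim_equal_location_from_idx := by
  intro idx _
  unfold Spec_location_from_idx location_from_idx location_from_idx_alt
  simp only [lfiPrefix]
  rw [lfiBisectRight_eval]
  simp only [lfiLoop]
  split_ifs <;> simp_all <;> omega
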